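-- pv_equiv track=rewrite | github.com/jbatteen/NataPOS | is_valid.py | is_valid_percent
-- ===== SOURCE A (Python) =====
-- def is_valid_percent(input_string=''):
--   if len(input_string) == 0:
--     return False
--   allowed = set("1234567890.%-")
--   numbers = set("1234567890")
--   decimal_count = 0
--   minus_count = 0
--   number_count = 0
--   percent_count = 0
--   strpos = 0
--   for i in input_string:
--     strpos +=1
--     if i not in allowed:
--       return False
--     if i in numbers:
--       number_count += 1
--     if i == '%':
--       percent_count += 1
--     if i == '.':
--       decimal_count += 1
--     if i == '-':
--       minus_count +=1
--   if decimal_count > 1: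
--     return False
--   if percent_count > 1:
--     return False
--   elif percent_count == 1 and input_string[-1] != '%':
--     return False
--   if number_count == 0:
--     return False
--   if minus_count > 1:
--     return False
--   elif minus_count == 1 and input_string[0] != '-':
--     return False
--   return True
-- ===== SOURCE B (Python) =====
-- def is_valid_percent(input_string=''):
--   # Parse: strip an optional leading '-', then an optional trailing '%', then
--   # recursively consume the body, which must be digits with at most one '.'
--   # and at least one digit.
--   def body(s, seen_digit, seen_dot):
--     if not s:
--       return seen_digit
--     c = s[0]
--     if c in '0123456789':
--       return body(s[1:], True, seen_dot)
--     if c == '.' and not seen_dot: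
--       return body(s[1:], seen_digit, True)
--     return False
--   s = input_string
--   if s.startswith('-'):
--     s = s[1:]
--   if s.endswith('%'):
--     s = s[:-1]
--   return body(s, False, False)
-- ===== Notes on version B (the rewrite author's own statement) =====
-- stated objective: alternative
-- what changed: B parses instead of counting: it strips an optional leading '-' and an optional trailing '%' with startswith/endswith and slicing, then runs a small recursive state machine over the remaining body that accepts only digits with at most one '.' and at least one digit; A instead makes one accumulating pass building five counters and applies post-hoc count/position checks.
import Mathlib
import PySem

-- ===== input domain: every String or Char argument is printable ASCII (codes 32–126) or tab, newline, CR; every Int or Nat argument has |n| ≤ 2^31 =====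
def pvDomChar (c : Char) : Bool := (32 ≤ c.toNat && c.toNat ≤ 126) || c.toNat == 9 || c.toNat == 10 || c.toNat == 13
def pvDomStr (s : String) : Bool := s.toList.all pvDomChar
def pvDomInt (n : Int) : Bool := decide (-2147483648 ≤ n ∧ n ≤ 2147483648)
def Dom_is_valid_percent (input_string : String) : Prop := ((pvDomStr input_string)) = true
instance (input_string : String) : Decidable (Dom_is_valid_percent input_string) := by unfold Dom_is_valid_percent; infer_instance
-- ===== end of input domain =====

-- B strips an optional leading '-' and optional trailing '%' and then parses the remaining
-- body with a small recursive state machine (digits, at most one dot, at least one digit),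
-- instead of A's counter-accumulating scan with post-hoc checks; objective: alternative.


-- ===== PORT A =====
-- the for-loop of A: state (strpos, decimal_count, minus_count, number_count, percent_count);
-- early 'return False' on a disallowed character is modelled as 'none'
def pvALoop (allowed numbers : PySem.Set Char) :
    List Char → Int → Int → Int → Int → Int → Option (Int × Int × Int × Int)
  | [], _, d, m, n, p => some (d, m, n, p)
  | i :: rest, strpos, d, m, n, p =>
    let strpos := strpos + 1
    if ¬ PySem.Set.contains allowed i then none
    else
      let n := if PySem.Set.contains numbers i then n + 1 else n
      let p := if i = '%' then p + 1 else p
      let d := if i = '.' then d + 1 else d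
      let m := if i = '-' then m + 1 else m
      pvALoop allowed numbers rest strpos d m n p

def is_valid_percent (input_string : String) : Bool :=
  if PySem.Str.len input_string = 0 then false
  else
    let allowed := PySem.Set.ofList "1234567890.%-".toList
    let numbers := PySem.Set.ofList "1234567890".toList
    match pvALoop allowed numbers input_string.toList 0 0 0 0 0 with
    | none => false
    | some (decimal_count, minus_count, number_count, percent_count) =>
      if decimal_count > 1 then false
      else if percent_count > 1 then false
      else if percent_count = 1 ∧ PySem.Str.pyGet? input_string (-1) ≠ some '%' then false
      else if number_count = 0 then false
      else if minus_count > 1 then false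
      else if minus_count = 1 ∧ PySem.Str.pyGet? input_string 0 ≠ some '-' then false
      else true

-- ===== PORT B =====
-- the inner recursive parser 'body' of Source B; 'c in "0123456789"' on a single
-- character is exactly character membership
def pvBody : List Char → Bool → Bool → Bool
  | [], seenDigit, _ => seenDigit
  | c :: rest, seenDigit, seenDot =>
    if c ∈ "0123456789".toList then pvBody rest true seenDot
    else if c = '.' ∧ seenDot = false then pvBody rest seenDigit true
    else false

def is_valid_percent_alt (input_string : String) : Bool :=
  let s0 := input_string.toList
  let s1 := if PySem.Chars.startswith s0 "-".toList then PySem.List.slice s0 (some 1) none else s0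
  let s2 := if PySem.Chars.endswith s1 "%".toList then PySem.List.slice s1 none (some (-1)) else s1
  pvBody s2 false false

-- ===== PRECONDITION & SPEC =====
def Spec_is_valid_percent (input_string : String) (out : Bool) : Prop := out = is_valid_percent_alt input_string
instance (input_string : String) (out : Bool) : Decidable (Spec_is_valid_percent input_string out) := by unfold Spec_is_valid_percent; infer_instance

-- ===== CLAIM (what is proved, stated in full; the proofs are below) =====
def Claim_equal_is_valid_percent : Prop := ∀ (input_string : String), Dom_is_valid_percent input_string → Spec_is_valid_percent input_string (is_valid_percent input_string)

-- ===== LEMMAS AND PROOFS =====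



-- closed form of A's loop: 'none' iff some character is disallowed, else the four counters
theorem pvALoop_spec (allowed numbers : PySem.Set Char) (l : List Char)
    (strpos d m n p : Int) :
    pvALoop allowed numbers l strpos d m n p =
      if l.all (fun c => PySem.Set.contains allowed c) then
        some (d + (l.count '.' : Int), m + (l.count '-' : Int),
              n + (l.countP (fun c => PySem.Set.contains numbers c) : Int),
              p + (l.count '%' : Int))
      else none := by
  induction l generalizing strpos d m n p with
  | nil => simp [pvALoop]
  | cons x t ih =>
    rw [pvALoop]
    simp only [ih]
    by_cases hx : PySem.Set.contains allowed x <;>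
      by_cases ht : t.all (fun c => PySem.Set.contains allowed c) <;>
      simp_all [List.count_cons, List.countP_cons]
    all_goals split_ifs
    all_goals try simp only [Option.some.injEq, Prod.mk.injEq]
    all_goals try refine ⟨?_, ?_, ?_, ?_⟩
    all_goals omega

-- digit / allowed-character predicates shared by the characterizations (proof-side helpers)
abbrev pvDig (c : Char) : Prop := c ∈ "0123456789".toList
abbrev pvAllowed (c : Char) : Prop := c ∈ "1234567890.%-".toList

theorem allowed_list_eq : "1234567890.%-".toList = ['1','2','3','4','5','6','7','8','9','0','.','%','-'] := by decide
theorem dig_list_eq : "0123456789".toList = ['0','1','2','3','4','5','6','7','8','9'] := by decide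
theorem numbers_list_eq : "1234567890".toList = ['1','2','3','4','5','6','7','8','9','0'] := by decide

theorem char_split (c : Char) : pvAllowed c ∧ c ≠ '%' ∧ c ≠ '-' ↔ pvDig c ∨ c = '.' := by
  unfold pvAllowed pvDig
  rw [allowed_list_eq, dig_list_eq]
  simp only [List.mem_cons, List.not_mem_nil, or_false]
  constructor
  · rintro ⟨hA, h1, h2⟩
    rcases hA with rfl|rfl|rfl|rfl|rfl|rfl|rfl|rfl|rfl|rfl|rfl|rfl|rfl <;> simp_all
  · rintro (h | rfl)
    · rcases h with rfl|rfl|rfl|rfl|rfl|rfl|rfl|rfl|rfl|rfl <;> exact ⟨by decide, by decide, by decide⟩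
    · exact ⟨by decide, by decide, by decide⟩

theorem dig_facts (c : Char) :
    pvDig c → pvAllowed c ∧ c ≠ '%' ∧ c ≠ '-' ∧ c ≠ '.' := by
  intro h; unfold pvDig at h; rw [dig_list_eq] at h
  simp only [List.mem_cons, List.not_mem_nil, or_false] at h
  rcases h with rfl|rfl|rfl|rfl|rfl|rfl|rfl|rfl|rfl|rfl <;>
    exact ⟨by decide, by decide, by decide, by decide⟩

theorem numbers_eq_dig (c : Char) : c ∈ "1234567890".toList ↔ pvDig c := by
  unfold pvDig; rw [numbers_list_eq, dig_list_eq]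
  simp only [List.mem_cons, List.not_mem_nil, or_false]
  tauto

-- core: on the stripped body, A's residual conditions coincide with B's parser conditions
theorem core_iff (u : List Char) :
    ((∀ c ∈ u, pvAllowed c) ∧ u.count '%' = 0 ∧ u.count '-' = 0 ∧
       0 < u.countP (fun c => decide (pvDig c)) ∧ u.count '.' ≤ 1)
    ↔ ((∀ c ∈ u, pvDig c ∨ c = '.') ∧ (∃ c ∈ u, pvDig c) ∧ u.count '.' ≤ 1) := by
  constructor
  · rintro ⟨hA, hp, hm, hd, hdot⟩
    have hp' : '%' ∉ u := List.count_eq_zero.mp hp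
    have hm' : '-' ∉ u := List.count_eq_zero.mp hm
    refine ⟨fun c hc => (char_split c).mp ⟨hA c hc, ?_, ?_⟩, ?_, hdot⟩
    · rintro rfl; exact hp' hc
    · rintro rfl; exact hm' hc
    · obtain ⟨c, hc, hcd⟩ := List.countP_pos_iff.mp hd
      exact ⟨c, hc, of_decide_eq_true hcd⟩
  · rintro ⟨hB, ⟨c0, hc0, hc0d⟩, hdot⟩
    have hall : ∀ c ∈ u, pvAllowed c ∧ c ≠ '%' ∧ c ≠ '-' := by
      intro c hc
      rcases hB c hc with h | rfl
      · obtain ⟨h1, h2, h3, -⟩ := dig_facts c h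
        exact ⟨h1, h2, h3⟩
      · exact ⟨by unfold pvAllowed; rw [allowed_list_eq]; decide, by decide, by decide⟩
    refine ⟨fun c hc => (hall c hc).1, ?_, ?_, ?_, hdot⟩
    · exact List.count_eq_zero.mpr (fun h => (hall _ h).2.1 rfl)
    · exact List.count_eq_zero.mpr (fun h => (hall _ h).2.2 rfl)
    · exact List.countP_pos_iff.mpr ⟨c0, hc0, decide_eq_true hc0d⟩

-- the main combinatorial bridge between A's count conditions and B's strip-then-parse
theorem key (l : List Char) :
    ((∀ c ∈ l, pvAllowed c) ∧ l.count '.' ≤ 1 ∧ l.count '%' ≤ 1 ∧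
       (l.count '%' = 1 → l.getLast? = some '%') ∧
       0 < l.countP (fun c => decide (pvDig c)) ∧
       l.count '-' ≤ 1 ∧ (l.count '-' = 1 → l.head? = some '-'))
    ↔ (let l1 := if l.head? = some '-' then l.tail else l
       let l2 := if l1.getLast? = some '%' then l1.dropLast else l1
       (∀ c ∈ l2, pvDig c ∨ c = '.') ∧ (∃ c ∈ l2, pvDig c) ∧ l2.count '.' ≤ 1) := by
  have em : (decide (pvDig '-')) = false := by decide
  have ep : (decide (pvDig '%')) = false := by decide
  by_cases hh : l.head? = some '-'
  · obtain ⟨t, rfl⟩ : ∃ t, l = '-' :: t := by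
      cases l with
      | nil => simp at hh
      | cons x t => simp at hh; exact ⟨t, by rw [hh]⟩
    simp only [List.head?_cons, if_true, List.tail_cons]
    by_cases hg : t.getLast? = some '%'
    · obtain ⟨u, rfl⟩ := List.getLast?_eq_some_iff.mp hg
      rw [if_pos hg, List.dropLast_concat, ← core_iff u]
      have hlast : ('-' :: (u ++ ['%'])).getLast? = some '%' := by
        rw [show ('-' :: (u ++ ['%'])) = ('-' :: u) ++ ['%'] from rfl, List.getLast?_concat]
      constructor
      · rintro ⟨hA, h1, h2, -, h4, h5, -⟩
        simp [List.count_append] at h1 h2 h5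
        simp only [List.countP_cons, List.countP_append, List.countP_nil, em, ep, Bool.false_eq_true, if_false, add_zero] at h4
        refine ⟨fun c hc => hA c (by simp [hc]), by omega, by omega, h4, h1⟩
      · rintro ⟨hA, hp, hm, hd, hdot⟩
        refine ⟨?_, ?_, ?_, fun _ => hlast, ?_, ?_, fun _ => trivial⟩
        · intro c hc
          rcases List.mem_cons.mp hc with rfl | hc
          · unfold pvAllowed; rw [allowed_list_eq]; decide
          · rcases List.mem_append.mp hc with hc | hc
            · exact hA c hc
            · rcases List.mem_singleton.mp hc with rfl
              unfold pvAllowed; rw [allowed_list_eq]; decide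
        · simp [List.count_append]; omega
        · simp [List.count_append]; omega
        · simpa only [List.countP_cons, List.countP_append, List.countP_nil, em, ep, Bool.false_eq_true, if_false, add_zero] using hd
        · simp [List.count_append]; omega
    · rw [if_neg hg, ← core_iff t]
      constructor
      · rintro ⟨hA, h1, h2, h3, h4, h5, -⟩
        simp at h1 h2 h5
        simp only [List.countP_cons, em, Bool.false_eq_true, if_false, add_zero] at h4
        have hp0 : List.count '%' t = 0 := by
          cases t with
          | nil => simp
          | cons y ys =>
            by_contra hne
            have hc1 : List.count '%' (y :: ys) = 1 := by omega
            have hl : List.count '%' ('-' :: y :: ys) = List.count '%' (y :: ys) := by simp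
            have := h3 (hl.trans hc1)
            rw [List.getLast?_cons_cons] at this
            exact hg this
        exact ⟨fun c hc => hA c (List.mem_cons_of_mem _ hc), hp0, by omega, h4, h1⟩
      · rintro ⟨hA, hp, hm, hd, hdot⟩
        refine ⟨?_, ?_, ?_, ?_, ?_, ?_, fun _ => trivial⟩
        · intro c hc
          rcases List.mem_cons.mp hc with rfl | hc
          · unfold pvAllowed; rw [allowed_list_eq]; decide
          · exact hA c hc
        · simp; omega
        · simp; omega
        · intro h; simp at h; omega
        · simpa only [List.countP_cons, em, Bool.false_eq_true, if_false, add_zero] using hd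
        · simp; omega
  · simp only [if_neg hh]
    by_cases hg : l.getLast? = some '%'
    · obtain ⟨u, rfl⟩ := List.getLast?_eq_some_iff.mp hg
      rw [if_pos hg, List.dropLast_concat, ← core_iff u]
      constructor
      · rintro ⟨hA, h1, h2, -, h4, h5, h6⟩
        simp [List.count_append] at h1 h2 h5
        simp only [List.countP_append, List.countP_cons, List.countP_nil, ep, Bool.false_eq_true, if_false, add_zero] at h4
        have hm0 : List.count '-' u = 0 := by
          by_contra hne
          exact hh (h6 (by simp [List.count_append]; omega))
        exact ⟨fun c hc => hA c (by simp [hc]), by omega, hm0, h4, h1⟩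
      · rintro ⟨hA, hp, hm, hd, hdot⟩
        refine ⟨?_, ?_, ?_, fun _ => List.getLast?_concat, ?_, ?_, ?_⟩
        · intro c hc
          rcases List.mem_append.mp hc with hc | hc
          · exact hA c hc
          · rcases List.mem_singleton.mp hc with rfl
            unfold pvAllowed; rw [allowed_list_eq]; decide
        · simp [List.count_append]; omega
        · simp [List.count_append]; omega
        · simpa only [List.countP_append, List.countP_cons, List.countP_nil, ep, Bool.false_eq_true, if_false, add_zero] using hd
        · simp [List.count_append]; omega
        · intro h; simp at h; omega
    · rw [if_neg hg, ← core_iff l]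
      constructor
      · rintro ⟨hA, h1, h2, h3, h4, h5, h6⟩
        have hp0 : List.count '%' l = 0 := by
          by_contra hne
          exact hg (h3 (by omega))
        have hm0 : List.count '-' l = 0 := by
          by_contra hne
          exact hh (h6 (by omega))
        exact ⟨hA, hp0, hm0, h4, h1⟩
      · rintro ⟨hA, hp, hm, hd, hdot⟩
        exact ⟨hA, hdot, by omega, fun h => absurd h (by omega), hd, by omega,
               fun h => absurd h (by omega)⟩

theorem pvBody_spec (l : List Char) (sd sdot : Bool) :
    pvBody l sd sdot = true ↔
      (∀ c ∈ l, pvDig c ∨ c = '.') ∧ (sd = true ∨ ∃ c ∈ l, pvDig c) ∧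
        l.count '.' + (if sdot then 1 else 0) ≤ 1 := by
  induction l generalizing sd sdot with
  | nil =>
    simp only [pvBody, List.not_mem_nil, List.count_nil]
    constructor
    · intro h; exact ⟨by simp, Or.inl h, by split <;> omega⟩
    · rintro ⟨-, h, -⟩; simpa using h
  | cons x t ih =>
    rw [pvBody]
    by_cases hx : x ∈ "0123456789".toList
    · have hnd : x ≠ '.' := fun h => by rw [h] at hx; exact absurd hx (by decide)
      rw [if_pos hx, ih]
      constructor
      · rintro ⟨h1, -, h3⟩
        refine ⟨?_, Or.inr ⟨x, List.mem_cons_self, hx⟩, by simp [hnd]; omega⟩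
        intro c hc
        rcases List.mem_cons.mp hc with rfl|hc
        · exact Or.inl hx
        · exact h1 c hc
      · rintro ⟨h1, -, h3⟩
        refine ⟨fun c hc => h1 c (List.mem_cons_of_mem _ hc), Or.inl rfl, ?_⟩
        simp [hnd] at h3; omega
    · rw [if_neg hx]
      by_cases hd : x = '.' ∧ sdot = false
      · obtain ⟨rfl, hs⟩ := hd
        subst hs
        rw [if_pos ⟨rfl, rfl⟩, ih]
        constructor
        · rintro ⟨h1, h2, h3⟩
          refine ⟨?_, ?_, ?_⟩
          · intro c hc
            rcases List.mem_cons.mp hc with rfl|hc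
            · exact Or.inr rfl
            · exact h1 c hc
          · rcases h2 with h|⟨c,hc,hcd⟩
            · exact Or.inl h
            · exact Or.inr ⟨c, List.mem_cons_of_mem _ hc, hcd⟩
          · simp at h3 ⊢; omega
        · rintro ⟨h1, h2, h3⟩
          refine ⟨fun c hc => h1 c (List.mem_cons_of_mem _ hc), ?_, ?_⟩
          · rcases h2 with h|⟨c,hc,hcd⟩
            · exact Or.inl h
            · rcases List.mem_cons.mp hc with rfl|hc
              · exact absurd hcd hx
              · exact Or.inr ⟨c, hc, hcd⟩
          · simp at h3 ⊢; omega
      · rw [if_neg hd]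
        simp only [Bool.false_eq_true, false_iff]
        rintro ⟨h1, h2, h3⟩
        rcases h1 x List.mem_cons_self with hc|hc
        · exact hx hc
        · subst hc
          by_cases hs : sdot = false
          · exact hd ⟨rfl, hs⟩
          · rw [eq_true_of_ne_false hs] at h3
            simp at h3

-- Python's  s.startswith('-')  on the list side is "head is '-'"
theorem startswith_iff_head (l : List Char) :
    PySem.Chars.startswith l "-".toList = true ↔ l.head? = some '-' := by
  rw [PySem.Chars.startswith_iff, show "-".toList = ['-'] from by decide]
  cases l with
  | nil => simp
  | cons x t =>
    rw [List.cons_prefix_cons]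
    simp [List.nil_prefix, eq_comm]

-- Python's  s.endswith('%')  on the list side is "last is '%'"
theorem endswith_iff_last (l : List Char) :
    PySem.Chars.endswith l "%".toList = true ↔ l.getLast? = some '%' := by
  rw [PySem.Chars.endswith_iff, show "%".toList = ['%'] from by decide,
      List.getLast?_eq_some_iff]
  constructor
  · rintro ⟨u, hu⟩; exact ⟨u, hu.symm⟩
  · rintro ⟨u, hu⟩; exact ⟨u, hu.symm⟩

-- the six early-return tests of A, flattened to a conjunction
theorem chain_iff (c1 c2 c3 c4 c5 c6 : Prop) [Decidable c1] [Decidable c2] [Decidable c3]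
    [Decidable c4] [Decidable c5] [Decidable c6] :
    ((if c1 then false else if c2 then false else if c3 then false
      else if c4 then false else if c5 then false else if c6 then false else true) = true)
    ↔ (¬c1 ∧ ¬c2 ∧ ¬c3 ∧ ¬c4 ∧ ¬c5 ∧ ¬c6) := by
  split_ifs <;> simp_all

-- characterization of port A by the seven count conditions of `key`
theorem hA_char (s : String) : is_valid_percent s = true ↔
    ((∀ c ∈ s.toList, pvAllowed c) ∧ s.toList.count '.' ≤ 1 ∧ s.toList.count '%' ≤ 1 ∧
       (s.toList.count '%' = 1 → s.toList.getLast? = some '%') ∧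
       0 < s.toList.countP (fun c => decide (pvDig c)) ∧
       s.toList.count '-' ≤ 1 ∧ (s.toList.count '-' = 1 → s.toList.head? = some '-')) := by
  have hnum : s.toList.countP (fun c => PySem.Set.contains (PySem.Set.ofList "1234567890".toList) c)
      = s.toList.countP (fun c => decide (pvDig c)) := by
    refine List.countP_congr (fun c _ => ?_)
    rw [PySem.Set.contains_iff, PySem.Set.mem_ofList, decide_eq_true_eq]
    exact numbers_eq_dig c
  have expand : is_valid_percent s =
      (if PySem.Str.len s = 0 then false
       else
         match pvALoop (PySem.Set.ofList "1234567890.%-".toList)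
             (PySem.Set.ofList "1234567890".toList) s.toList 0 0 0 0 0 with
         | none => false
         | some (decimal_count, minus_count, number_count, percent_count) =>
           if decimal_count > 1 then false
           else if percent_count > 1 then false
           else if percent_count = 1 ∧ PySem.Str.pyGet? s (-1) ≠ some '%' then false
           else if number_count = 0 then false
           else if minus_count > 1 then false
           else if minus_count = 1 ∧ PySem.Str.pyGet? s 0 ≠ some '-' then false
           else true) := rfl
  rw [expand, pvALoop_spec]
  by_cases h0 : PySem.Str.len s = 0
  · rw [if_pos h0]
    have hnil : s.toList = [] := by simpa [pysem] using h0
    simp [hnil]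
  · rw [if_neg h0]
    by_cases hall : s.toList.all (fun c => PySem.Set.contains (PySem.Set.ofList "1234567890.%-".toList) c)
    · rw [if_pos hall]
      have hall' : ∀ c ∈ s.toList, pvAllowed c := by
        intro c hc
        have := List.all_eq_true.mp hall c hc
        rw [PySem.Set.contains_iff, PySem.Set.mem_ofList] at this
        exact this
      rw [hnum, chain_iff]
      rw [show PySem.Str.pyGet? s (-1) = s.toList.getLast? from by
            simp [pysem, PySem.List.pyGet?_neg_one],
          show PySem.Str.pyGet? s 0 = s.toList.head? from by
            simp [pysem, PySem.List.pyGet?_zero, List.head?_eq_getElem?]]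
      constructor
      · rintro ⟨h1, h2, h3, h4, h5, h6⟩
        push Not at h3 h6
        refine ⟨hall', by omega, by omega, fun hp => h3 (by omega), by omega, by omega,
                fun hm => h6 (by omega)⟩
      · rintro ⟨-, h1, h2, h3, h4, h5, h6⟩
        refine ⟨by omega, by omega, ?_, by omega, by omega, ?_⟩
        · rintro ⟨hp, hq⟩; exact hq (h3 (by omega))
        · rintro ⟨hm, hq⟩; exact hq (h6 (by omega))
    · rw [if_neg hall]
      simp only [Bool.false_eq_true, false_iff]
      rintro ⟨hA, -⟩
      refine hall (List.all_eq_true.mpr fun c hc => ?_)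
      rw [PySem.Set.contains_iff, PySem.Set.mem_ofList]
      exact hA c hc

-- characterization of port B: strip, then the parser conditions of `pvBody_spec`
theorem hB_char (s : String) : is_valid_percent_alt s = true ↔
    (let l1 := if s.toList.head? = some '-' then s.toList.tail else s.toList
     let l2 := if l1.getLast? = some '%' then l1.dropLast else l1
     (∀ c ∈ l2, pvDig c ∨ c = '.') ∧ (∃ c ∈ l2, pvDig c) ∧ l2.count '.' ≤ 1) := by
  have e1 : (if PySem.Chars.startswith s.toList "-".toList then
        PySem.List.slice s.toList (some 1) none else s.toList)
      = (if s.toList.head? = some '-' then s.toList.tail else s.toList) := by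
    by_cases h : s.toList.head? = some '-'
    · rw [if_pos h, if_pos ((startswith_iff_head _).mpr h), PySem.List.slice_from_one]
    · rw [if_neg h, if_neg (fun hc => h ((startswith_iff_head _).mp hc))]
  have e2 : ∀ (m : List Char), (if PySem.Chars.endswith m "%".toList then
        PySem.List.slice m none (some (-1)) else m)
      = (if m.getLast? = some '%' then m.dropLast else m) := by
    intro m
    by_cases h : m.getLast? = some '%'
    · rw [if_pos h, if_pos ((endswith_iff_last _).mpr h), PySem.List.slice_to_neg_one]
    · rw [if_neg h, if_neg (fun hc => h ((endswith_iff_last _).mp hc))]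
  show pvBody _ false false = true ↔ _
  rw [e1, e2, pvBody_spec]
  simp only [Bool.false_eq_true, false_or, if_false, add_zero]

theorem ab_agree (s : String) : is_valid_percent s = is_valid_percent_alt s := by
  have h : (is_valid_percent s = true) ↔ (is_valid_percent_alt s = true) :=
    (hA_char s).trans ((key s.toList).trans (hB_char s).symm)
  cases h1 : is_valid_percent s with
  | true => exact (h.mp h1).symm
  | false =>
    cases h2 : is_valid_percent_alt s with
    | true => exact absurd (h.mpr h2) (by rw [h1]; simp)
    | false => rfl

-- ===== VERDICT (by name: the statement is the Claim_ definition above) =====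
theorem is_valid_percent_spec : Claim_equal_is_valid_percent := by
  intro s _
  unfold Spec_is_valid_percent
  exact ab_agree s
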